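-- pv_equiv track=rewrite | github.com/Sohaib267/DSA.python | Reverse_pairs.py | countReverse
-- ===== SOURCE A (Python) =====
-- from collections import defaultdict
--
-- def reverse(num):
--
--     rev_num = 0
--
--     while (num > 0):
--
--         rev_num = rev_num * 10 + num % 10
--         num = num // 10
--
--     return rev_num
--
-- def countReverse(arr, n):
--
--     freq = defaultdict (int)
--
--     for i in range (n):
--         freq[arr[i]] += 1
--
--     res = 0
--
--     for i in range (n):
--         freq[arr[i]] -= 1
--         res += freq[reverse(arr[i])]
--
--     return res
-- ===== SOURCE B (Python) =====
-- def reverse(num):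
--
--     rev_num = 0
--
--     while (num > 0):
--
--         rev_num = rev_num * 10 + num % 10
--         num = num // 10
--
--     return rev_num
--
-- def countReverse(arr, n):
--
--     res = 0
--
--     for i in range(n):
--         for j in range(i + 1, n):
--             if arr[j] == reverse(arr[i]):
--                 res += 1
--
--     return res
-- ===== Notes on version B (the rewrite author's own statement) =====
-- stated objective: simpler
-- what changed: Replaced the two-pass frequency-dictionary counting (build a Counter, then decrement-and-lookup) by a direct nested i<j double loop that counts positions j>i with arr[j] == reverse(arr[i]); no dictionary at all.
import Mathlib
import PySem

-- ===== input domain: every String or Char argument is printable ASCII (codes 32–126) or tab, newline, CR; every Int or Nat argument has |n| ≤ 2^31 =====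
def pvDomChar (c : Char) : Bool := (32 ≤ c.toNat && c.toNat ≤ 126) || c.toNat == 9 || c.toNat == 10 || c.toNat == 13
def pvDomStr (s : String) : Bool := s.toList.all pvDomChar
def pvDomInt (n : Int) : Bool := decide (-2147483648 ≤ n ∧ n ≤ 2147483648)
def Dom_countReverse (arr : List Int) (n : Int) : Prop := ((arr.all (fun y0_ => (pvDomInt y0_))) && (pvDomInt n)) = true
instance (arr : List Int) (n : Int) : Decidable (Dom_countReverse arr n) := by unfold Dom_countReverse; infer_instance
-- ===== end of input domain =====

-- B replaces A's frequency-dictionary counting by a direct nested i<j double loop (simpler, no dict; same result).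


-- ===== PORT A =====
-- shared helper `reverse` (identical in Source A and Source B): while num > 0: rev = rev*10 + num%10; num //= 10
def pyReverseAux (num rev_num : Int) : Int :=
  if 0 < num then
    pyReverseAux (PySem.Int.floordiv num 10) (rev_num * 10 + PySem.Int.mod num 10)
  else rev_num
  termination_by num.toNat
  decreasing_by
    simp only [PySem.Int.floordiv_eq_ediv_of_pos (by norm_num : (0:Int) < 10)]
    omega

def pyReverse (num : Int) : Int := pyReverseAux num 0

def countReverse (arr : List Int) (n : Int) : Int :=
  let freq := (PySem.List.pyRange 0 n 1).foldl
      (fun d i => d.modify (PySem.List.pyGetD arr i 0) 0 (· + 1))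
      (PySem.Dict.empty : PySem.Dict Int Int)
  let st := (PySem.List.pyRange 0 n 1).foldl
      (fun (st : PySem.Dict Int Int × Int) i =>
        let x := PySem.List.pyGetD arr i 0
        let f := st.1.modify x 0 (· - 1)
        (f, st.2 + f.getD (pyReverse x) 0))
      (freq, 0)
  st.2

-- ===== PORT B =====
def countReverse_alt (arr : List Int) (n : Int) : Int :=
  (PySem.List.pyRange 0 n 1).foldl
    (fun res i =>
      (PySem.List.pyRange (i + 1) n 1).foldl
        (fun c j =>
          if PySem.List.pyGetD arr j 0 = pyReverse (PySem.List.pyGetD arr i 0) then c + 1 else c)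
        res)
    0

-- ===== PRECONDITION & SPEC =====
-- Pre_ excludes only the inputs where A raises IndexError (n larger than len(arr)).
def Pre_countReverse (arr : List Int) (n : Int) : Prop := n ≤ (arr.length : Int)
instance (arr : List Int) (n : Int) : Decidable (Pre_countReverse arr n) := by
  unfold Pre_countReverse; infer_instance

def pvWitness_countReverse : List Int × Int := ([12, 21, 3, 30, 21], 5)

def Spec_countReverse (arr : List Int) (n : Int) (out : Int) : Prop := out = countReverse_alt arr n
instance (arr : List Int) (n : Int) (out : Int) : Decidable (Spec_countReverse arr n out) := by
  unfold Spec_countReverse; infer_instance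

-- ===== CLAIM (what is proved, stated in full; the proofs are below) =====
def Claim_equal_countReverse : Prop := ∀ (arr : List Int) (n : Int), Dom_countReverse arr n → Pre_countReverse arr n → Spec_countReverse arr n (countReverse arr n)

-- ===== LEMMAS AND PROOFS =====

-- S xs = number of pairs i<j in xs with xs[j] = reverse(xs[i])
def pvS : List Int → Int
  | [] => 0
  | x :: t => (t.count (pyReverse x) : Int) + pvS t

-- the segment arr[a:n] as a list
def pvSeg (arr : List Int) (n a : Int) : List Int := (arr.take n.toNat).drop a.toNat

theorem pvSeg_nil {arr : List Int} {n a : Int} (h : n ≤ a) (_h0 : 0 ≤ n) :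
    pvSeg arr n a = [] := by
  unfold pvSeg
  apply List.drop_eq_nil_of_le
  have := List.length_take_le n.toNat arr
  omega

theorem pvSeg_cons {arr : List Int} {n a : Int} (h0 : 0 ≤ a) (_h1 : a < n)
    (h2 : n ≤ (arr.length : Int)) :
    pvSeg arr n a = PySem.List.pyGetD arr a 0 :: pvSeg arr n (a + 1) := by
  unfold pvSeg
  have hlt : a.toNat < (arr.take n.toNat).length := by
    simp [List.length_take]; omega
  rw [List.drop_eq_getElem_cons hlt]
  have hgl : (arr.take n.toNat)[a.toNat] = arr[a.toNat]'(by simp at hlt; omega) :=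
    List.getElem_take
  rw [PySem.List.pyGetD_eq_getElem arr (0:Int) h0 (by exact_mod_cast by omega)]
  have h3 : (a + 1).toNat = a.toNat + 1 := by omega
  rw [hgl, h3]

-- a fold over range(a, n) reading only arr[i] equals the fold over the segment arr[a:n]
theorem pvFold_range_seg {β : Type} (arr : List Int) (n : Int) (f : β → Int → β) (g : β → Int → β)
    (hf : ∀ b i, f b i = g b (PySem.List.pyGetD arr i 0))
    (h2 : n ≤ (arr.length : Int)) (h0 : 0 ≤ n) :
    ∀ (k : Nat) (a : Int) (b : β), 0 ≤ a → (n - a).toNat = k →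
      (PySem.List.pyRange a n 1).foldl f b = (pvSeg arr n a).foldl g b := by
  intro k
  induction k with
  | zero =>
    intro a b ha hk
    rw [PySem.List.pyRange_one_eq_nil (by omega), pvSeg_nil (by omega) h0]
    simp
  | succ m ih =>
    intro a b ha hk
    rw [PySem.List.pyRange_one_cons (by omega), pvSeg_cons ha (by omega) h2]
    simp only [List.foldl_cons, hf]
    exact ih (a + 1) _ (by omega) (by omega)

-- the inner loop of B counts occurrences of the target in the segment
theorem pvInner (arr : List Int) (n : Int) (t : Int)
    (h2 : n ≤ (arr.length : Int)) (h0 : 0 ≤ n) :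
    ∀ (k : Nat) (a c : Int), 0 ≤ a → (n - a).toNat = k →
      (PySem.List.pyRange a n 1).foldl
          (fun c j => if PySem.List.pyGetD arr j 0 = t then c + 1 else c) c
        = c + ((pvSeg arr n a).count t : Int) := by
  intro k
  induction k with
  | zero =>
    intro a c ha hk
    rw [PySem.List.pyRange_one_eq_nil (by omega), pvSeg_nil (by omega) h0]
    simp
  | succ m ih =>
    intro a c ha hk
    rw [PySem.List.pyRange_one_cons (by omega), pvSeg_cons ha (by omega) h2]
    simp only [List.foldl_cons, List.count_cons]
    rw [ih (a + 1) _ (by omega) (by omega)]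
    by_cases hx : PySem.List.pyGetD arr a 0 = t
    · simp [hx]; ring
    · simp [hx]
  -- B's outer loop accumulates pvS of the segment
theorem pvOuter (arr : List Int) (n : Int)
    (h2 : n ≤ (arr.length : Int)) (h0 : 0 ≤ n) :
    ∀ (k : Nat) (a res : Int), 0 ≤ a → (n - a).toNat = k →
      (PySem.List.pyRange a n 1).foldl
          (fun res i =>
            (PySem.List.pyRange (i + 1) n 1).foldl
              (fun c j =>
                if PySem.List.pyGetD arr j 0 = pyReverse (PySem.List.pyGetD arr i 0) then c + 1 else c)
              res)
          res
        = res + pvS (pvSeg arr n a) := by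
  intro k
  induction k with
  | zero =>
    intro a res ha hk
    rw [PySem.List.pyRange_one_eq_nil (by omega), pvSeg_nil (by omega) h0]
    simp [pvS]
  | succ m ih =>
    intro a res ha hk
    rw [PySem.List.pyRange_one_cons (by omega), pvSeg_cons ha (by omega) h2]
    simp only [List.foldl_cons]
    rw [pvInner arr n _ h2 h0 (n - (a+1)).toNat (a + 1) res (by omega) rfl]
    rw [ih (a + 1) _ (by omega) (by omega)]
    simp [pvS]; ring

-- A's second loop: if the dict currently holds the multiset counts of xs, the loop adds pvS xs
theorem pvInv (xs : List Int) :
    ∀ (d : PySem.Dict Int Int) (res : Int),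
      (∀ v, d.getD v 0 = (xs.count v : Int)) →
      (xs.foldl
          (fun (st : PySem.Dict Int Int × Int) x =>
            (st.1.modify x 0 (· - 1),
             st.2 + (st.1.modify x 0 (· - 1)).getD (pyReverse x) 0))
          (d, res)).2 = res + pvS xs := by
  induction xs with
  | nil => intro d res _; simp [pvS]
  | cons x t ih =>
    intro d res hd
    simp only [List.foldl_cons]
    have hstep : ∀ v, (d.modify x 0 (· - 1)).getD v 0 = (t.count v : Int) := by
      intro v
      rw [PySem.Dict.getD_modify]
      by_cases hv : v = x
      · subst hv
        have := hd v
        simp at this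
        simp [this]
      · simp only [if_neg hv]
        have := hd v
        have hv' : ¬ (x = v) := fun h => hv h.symm
        simp [hv'] at this
        simpa using this
    rw [ih (d.modify x 0 (· - 1)) _ hstep, hstep (pyReverse x)]
    simp [pvS]; ring

theorem countReverse_spec : Claim_equal_countReverse := by
  intro arr n _ hpre
  unfold Spec_countReverse countReverse countReverse_alt
  unfold Pre_countReverse at hpre
  dsimp only
  by_cases h0 : 0 ≤ n
  · -- first loop builds the counter of the segment arr[0:n], second loop is pvInv, B is pvOuter
    rw [pvFold_range_seg arr n
          (fun (d : PySem.Dict Int Int) i => d.modify (PySem.List.pyGetD arr i 0) 0 (· + 1))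
          (fun d x => d.modify x 0 (· + 1)) (fun _ _ => rfl) hpre h0 (n - 0).toNat 0 _ le_rfl rfl]
    rw [pvFold_range_seg arr n
          (fun (st : PySem.Dict Int Int × Int) i =>
            (st.1.modify (PySem.List.pyGetD arr i 0) 0 (· - 1),
             st.2 + (st.1.modify (PySem.List.pyGetD arr i 0) 0 (· - 1)).getD
               (pyReverse (PySem.List.pyGetD arr i 0)) 0))
          (fun (st : PySem.Dict Int Int × Int) x =>
            (st.1.modify x 0 (· - 1),
             st.2 + (st.1.modify x 0 (· - 1)).getD (pyReverse x) 0))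
          (fun _ _ => rfl) hpre h0 (n - 0).toNat 0 _ le_rfl rfl]
    rw [pvOuter arr n hpre h0 (n - 0).toNat 0 0 le_rfl rfl]
    have hcnt : ∀ v, ((pvSeg arr n 0).foldl
        (fun d x => d.modify x 0 (· + 1)) (PySem.Dict.empty : PySem.Dict Int Int)).getD v 0
        = ((pvSeg arr n 0).count v : Int) := by
      intro v
      rw [PySem.Dict.getD_foldl_modify_add_one]
      simp
    rw [pvInv (pvSeg arr n 0) _ 0 hcnt]
  · -- n < 0: both ranges are empty, both results are 0
    rw [PySem.List.pyRange_one_eq_nil (by omega)]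
    simp

-- ===== VERDICT (by name: the statement is the Claim_ definition above) =====
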